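-- pv_equiv track=rewrite | github.com/Nokkvi96/dailycodingproblem | 654.py | hjalparfall
-- ===== SOURCE A (Python) =====
-- def hjalparfall(s, seen):
--   """We have a list seen and string s and we check in every recursion if
--   we have substring with the tail of s and the beginning og s.
--   if the substring exists we recurse with that substring as s
--   if it does not exist we return s
--
--   Parameters
--   ----------
--   s : string
--     In every recursion we cut of either the last letter or first.
--   seen: list
--     List of character. We check if s contains all chars in seen.
--   """
--   matched_beg = []
--   matched_tail = []
--   for i in seen:
--     matched_beg.append(i in s[:len(s)-1])
--   for i in seen:
--     matched_tail.append(i in s[1:])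
--
--   if (not all(matched_beg) and not all(matched_tail)):
--     return len(s)
--   if (all(matched_beg)):
--     return(hjalparfall(s[:len(s)-1], seen))
--   if (all(matched_tail)):
--     return(hjalparfall(s[1:], seen))
-- ===== SOURCE B (Python) =====
-- def hjalparfall(s, seen):
--     def ok(t):
--         return all(x in t for x in seen)
--     n = len(s)
--     if not ok(s):
--         return n
--     j = next(j for j in range(n + 1) if ok(s[:j]))
--     i = next(i for i in range(j, -1, -1) if ok(s[i:j]))
--     return j - i
-- ===== Notes on version B (the rewrite author's own statement) =====
-- stated objective: faster
-- what changed: A recursively trims the string (last char preferred, else first), copying two slices and re-testing every seen element at each of its O(|s|) recursion levels; B computes the final window directly - the minimal prefix end j containing all seen substrings, then the maximal start i with s[i:j] still containing them - via two monotone scans that stop as soon as the window is found.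
-- outside the precondition, e.g. on hjalparfall('ab', ['']): A raises RecursionError, B returns 0
import Mathlib
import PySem

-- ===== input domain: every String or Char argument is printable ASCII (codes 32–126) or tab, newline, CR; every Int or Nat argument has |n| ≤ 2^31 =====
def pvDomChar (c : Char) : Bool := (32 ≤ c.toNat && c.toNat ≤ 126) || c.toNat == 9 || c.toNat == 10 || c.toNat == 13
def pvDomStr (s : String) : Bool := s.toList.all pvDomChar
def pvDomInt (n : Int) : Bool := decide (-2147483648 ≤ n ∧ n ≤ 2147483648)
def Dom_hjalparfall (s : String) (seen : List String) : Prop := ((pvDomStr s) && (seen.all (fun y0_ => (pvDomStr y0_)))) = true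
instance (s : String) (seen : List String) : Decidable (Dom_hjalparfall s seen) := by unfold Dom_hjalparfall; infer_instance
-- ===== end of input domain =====

-- B replaces A's recursive two-sided trimming (which copies two slices and re-tests every seen element
-- at each recursion level) by a direct computation of the final window: the minimal prefix end j, then
-- the maximal start i with s[i:j] still containing every seen substring (measured faster in a timing run).

-- ===== PORT A =====
-- fuel = len(s)+1 only makes the recursion structural; each Python recursion shortens s by 1, so fuel
-- never runs out where the Python returns (it runs out exactly where the Python recurses forever,
-- excluded by Pre_).
def hjA (fuel : Nat) (s : List Char) (seen : List String) : Int :=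
  match fuel with
  | 0 => 0
  | fuel + 1 =>
    let matched_beg := seen.map (fun i => PySem.Chars.isIn i.toList (PySem.List.slice s none (some ((s.length : Int) - 1))))
    let matched_tail := seen.map (fun i => PySem.Chars.isIn i.toList (PySem.List.slice s (some 1) none))
    if !matched_beg.all id && !matched_tail.all id then (s.length : Int)
    else if matched_beg.all id then hjA fuel (PySem.List.slice s none (some ((s.length : Int) - 1))) seen
    else if matched_tail.all id then hjA fuel (PySem.List.slice s (some 1) none) seen
    else 0  -- Python falls off the function here; logically unreachable (one of the three ifs always fires)

def hjalparfall (s : String) (seen : List String) : Int :=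
  hjA (s.toList.length + 1) s.toList seen

-- ===== PORT B =====
def okB (seen : List String) (t : List Char) : Bool :=
  seen.all (fun x => PySem.Chars.isIn x.toList t)

def hjB (t : List Char) (seen : List String) : Int :=
  let n : Int := t.length
  if !okB seen t then n
  else
    -- the two next(...) searches; .getD 0 is unreachable (j = n resp. i = 0 always satisfy the predicate)
    let j := ((PySem.List.pyRange 0 (n + 1) 1).find? (fun j => okB seen (PySem.List.slice t none (some j)))).getD 0
    let i := ((PySem.List.pyRange j (-1) (-1)).find? (fun i => okB seen (PySem.List.slice t (some i) (some j)))).getD 0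
    j - i

def hjalparfall_alt (s : String) (seen : List String) : Int := hjB s.toList seen

-- ===== PRECONDITION & SPEC =====
-- Pre_ excludes exactly the inputs where every element of seen is the empty string (including seen = []):
-- there A's recursion never stops (every substring test succeeds) and Python raises RecursionError.
def Pre_hjalparfall (s : String) (seen : List String) : Prop := ∃ x ∈ seen, x ≠ ""
instance (s : String) (seen : List String) : Decidable (Pre_hjalparfall s seen) := by unfold Pre_hjalparfall; infer_instance
def pvWitness_hjalparfall : String × List String := ("abcab", ["a", "b"])

def Spec_hjalparfall (s : String) (seen : List String) (out : Int) : Prop := out = hjalparfall_alt s seen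
instance (s : String) (seen : List String) (out : Int) : Decidable (Spec_hjalparfall s seen out) := by unfold Spec_hjalparfall; infer_instance

-- ===== CLAIM (what is proved, stated in full; the proofs are below) =====
def Claim_equal_hjalparfall : Prop := ∀ (s : String) (seen : List String), Dom_hjalparfall s seen → Pre_hjalparfall s seen → Spec_hjalparfall s seen (hjalparfall s seen)
-- ===== LEMMAS AND PROOFS =====

-- okB is monotone under the infix order (a substring of an infix is a substring of the whole)
lemma okB_mono {seen : List String} {u v : List Char} (h : u <:+: v) (hu : okB seen u = true) :
    okB seen v = true := by
  simp only [okB, List.all_eq_true] at hu ⊢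
  intro x hx
  exact (PySem.Chars.isIn_iff_infix _ _).2 ((((PySem.Chars.isIn_iff_infix _ _).1 (hu x hx))).trans h)

lemma okB_nonempty {seen : List String} {t : List Char} (hpre : ∃ x ∈ seen, x.toList ≠ [])
    (ht : okB seen t = true) : t ≠ [] := by
  rintro rfl
  obtain ⟨x, hx, hxe⟩ := hpre
  simp only [okB, List.all_eq_true] at ht
  exact hxe (List.eq_nil_of_infix_nil ((PySem.Chars.isIn_iff_infix _ _).1 (ht x hx)))

-- the slice s[:len(s)-1] is dropLast
lemma slice_pred (t : List Char) :
    PySem.List.slice t none (some ((t.length : Int) - 1)) = t.dropLast := by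
  cases t with
  | nil => simpa using PySem.List.slice_to_neg_one ([] : List Char)
  | cons a l =>
      have h : ((a :: l).length : Int) - 1 = ((l.length : Nat) : Int) := by
        simp [List.length_cons]
      rw [h, PySem.List.slice_to_natCast, List.dropLast_eq_take]
      simp

-- find? respects pointwise-equal predicates on the list (no such lemma in Mathlib/PySem)
lemma find?_congr_mem {α : Type} {l : List α} {p q : α → Bool}
    (h : ∀ x ∈ l, p x = q x) : l.find? p = l.find? q := by
  induction l with
  | nil => rfl
  | cons a l ih =>
      by_cases ha : p a = true
      · rw [List.find?_cons_of_pos ha, List.find?_cons_of_pos (by rw [← h a (by simp)]; exact ha)]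
      · rw [List.find?_cons_of_neg ha, List.find?_cons_of_neg (by rw [← h a (by simp)]; exact ha),
          ih fun x hx => h x (by simp [hx])]

-- find? over an ascending range returns the first satisfying index
lemma findAsc {p : Int → Bool} {b k : Int} (hp : p k = true) :
    ∀ (n : Nat) (a : Int), (k - a).toNat = n → a ≤ k → k < b →
      (∀ m : Int, a ≤ m → m < k → p m = false) →
      (PySem.List.pyRange a b 1).find? p = some k := by
  intro n
  induction n with
  | zero =>
      intro a hn ha hk _
      have hak : a = k := by omega
      subst hak
      rw [PySem.List.pyRange_one_cons (by omega), List.find?_cons_of_pos hp]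
  | succ n ih =>
      intro a hn ha hk hmin
      have hak : a < k := by omega
      rw [PySem.List.pyRange_one_cons (by omega),
        List.find?_cons_of_neg (by simp [hmin a le_rfl hak])]
      exact ih (a + 1) (by omega) (by omega) hk (fun m hm hmk => hmin m (by omega) hmk)

-- find? over a descending range range(a, -1, -1) returns the first (= largest) satisfying index
lemma findDesc {p : Int → Bool} {k : Int} (hk0 : 0 ≤ k) (hp : p k = true) :
    ∀ (n : Nat) (a : Int), (a - k).toNat = n → k ≤ a →
      (∀ m : Int, k < m → m ≤ a → p m = false) →
      (PySem.List.pyRange a (-1) (-1)).find? p = some k := by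
  intro n
  induction n with
  | zero =>
      intro a hn ha _
      have hak : a = k := by omega
      subst hak
      rw [PySem.List.pyRange_neg_one_cons (by omega), List.find?_cons_of_pos hp]
  | succ n ih =>
      intro a hn ha hmax
      have hak : k < a := by omega
      rw [PySem.List.pyRange_neg_one_cons (by omega),
        List.find?_cons_of_neg (by simp [hmax a hak le_rfl])]
      exact ih (a - 1) (by omega) (by omega) (fun m hm hmk => hmax m hm (by omega))

-- no prefix strictly shorter than t can work when dropLast does not
lemma okB_take_false {seen : List String} {t : List Char} (hb : okB seen t.dropLast = false)
    {m : Nat} (hm : m < t.length) : okB seen (t.take m) = false := by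
  cases h : okB seen (t.take m) with
  | false => rfl
  | true =>
      exfalso
      have hpre : t.take m <+: t.dropLast := by
        rw [List.dropLast_eq_take]
        exact List.take_prefix_take_left (by omega)
      rw [okB_mono hpre.isInfix h] at hb
      exact Bool.noConfusion hb

-- no suffix starting at 1 or later can work when tail does not
lemma okB_drop_false {seen : List String} {t : List Char} (hl : okB seen t.tail = false)
    {m : Nat} (hm : 1 ≤ m) : okB seen (t.drop m) = false := by
  cases h : okB seen (t.drop m) with
  | false => rfl
  | true =>
      exfalso
      have heq : (t.drop 1).drop (m - 1) = t.drop m := by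
        rw [List.drop_drop]
        congr 1
        omega
      have hsuf : t.drop m <:+ t.tail := by
        rw [← List.drop_one, ← heq]
        exact List.drop_suffix _ _
      rw [okB_mono hsuf.isInfix h] at hl
      exact Bool.noConfusion hl

-- slicing t[i:len(t)] is dropping
lemma slice_drop (t : List Char) {i : Int} (h0 : 0 ≤ i) :
    PySem.List.slice t (some i) (some (t.length : Int)) = t.drop i.toNat := by
  rw [PySem.List.slice_toNat t h0 (by positivity)]
  apply List.take_of_length_le
  simp [List.length_drop]

-- when t works but dropLast does not, the first search stops only at the full length
lemma jfind_full {seen : List String} {t : List Char} (ht : okB seen t = true)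
    (hb : okB seen t.dropLast = false) :
    ((PySem.List.pyRange 0 ((t.length : Int) + 1) 1).find?
      (fun j => okB seen (PySem.List.slice t none (some j)))).getD 0 = (t.length : Int) := by
  have hp : (fun j => okB seen (PySem.List.slice t none (some j))) ((t.length : Nat) : Int) = true := by
    show okB seen (PySem.List.slice t none (some ((t.length : Nat) : Int))) = true
    rw [PySem.List.slice_to_natCast, List.take_length]
    exact ht
  have hmin : ∀ m : Int, 0 ≤ m → m < ((t.length : Nat) : Int) →
      (fun j => okB seen (PySem.List.slice t none (some j))) m = false := by
    intro m h0 hm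
    show okB seen (PySem.List.slice t none (some m)) = false
    rw [PySem.List.slice_to t h0]
    exact okB_take_false hb (by omega)
  rw [findAsc hp _ 0 rfl (by omega) (by omega) hmin, Option.getD_some]

-- B returns len(t) when t works but neither dropping the last nor the first char does
lemma hjB_base {seen : List String} {t : List Char} (ht : okB seen t = true)
    (hb : okB seen t.dropLast = false) (hl : okB seen t.tail = false) :
    hjB t seen = (t.length : Int) := by
  have hj := jfind_full ht hb
  have hp2 : (fun i => okB seen (PySem.List.slice t (some i) (some (t.length : Int)))) 0 = true := by
    show okB seen (PySem.List.slice t (some 0) (some (t.length : Int))) = true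
    rw [slice_drop t le_rfl]
    simpa using ht
  have hmax : ∀ m : Int, 0 < m → m ≤ ((t.length : Nat) : Int) →
      (fun i => okB seen (PySem.List.slice t (some i) (some (t.length : Int)))) m = false := by
    intro m hm0 hma
    show okB seen (PySem.List.slice t (some m) (some (t.length : Int))) = false
    rw [slice_drop t (by omega)]
    exact okB_drop_false hl (by omega)
  simp only [hjB, ht, Bool.not_true, Bool.false_eq_true, if_false, hj]
  rw [findDesc le_rfl hp2 _ ((t.length : Int)) rfl (by omega) hmax, Option.getD_some]
  omega

-- dropping the last char when it is droppable does not change B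
lemma hjB_dropLast {seen : List String} {t : List Char} (hb : okB seen t.dropLast = true) :
    hjB t seen = hjB t.dropLast seen := by
  by_cases h0 : t = []
  · subst h0; rw [List.dropLast_nil]
  have hlen : 1 ≤ t.length := by cases t <;> simp_all
  have ht : okB seen t = true := okB_mono (List.dropLast_prefix t).isInfix hb
  have hex : ∃ j : Nat, okB seen (t.take j) = true :=
    ⟨t.length - 1, by rw [← List.dropLast_eq_take]; exact hb⟩
  have hj0le : Nat.find hex ≤ t.length - 1 :=
    Nat.find_min' hex (by rw [← List.dropLast_eq_take]; exact hb)
  set j0 := Nat.find hex with hj0def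
  have hpj0 : okB seen (t.take j0) = true := Nat.find_spec hex
  have hminj0 : ∀ m : Nat, m < j0 → okB seen (t.take m) = false := by
    intro m hm
    cases h : okB seen (t.take m) with
    | false => rfl
    | true => exact absurd h (Nat.find_min hex hm)
  have htake : ∀ m : Nat, m ≤ t.length - 1 → t.dropLast.take m = t.take m := by
    intro m hm
    rw [List.dropLast_eq_take, List.take_take, min_eq_left hm]
  -- first search on t
  have hpA : (fun j => okB seen (PySem.List.slice t none (some j))) ((j0 : Nat) : Int) = true := by
    show okB seen (PySem.List.slice t none (some ((j0 : Nat) : Int))) = true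
    rw [PySem.List.slice_to_natCast]
    exact hpj0
  have hminA : ∀ m : Int, 0 ≤ m → m < ((j0 : Nat) : Int) →
      (fun j => okB seen (PySem.List.slice t none (some j))) m = false := by
    intro m hm0 hm
    show okB seen (PySem.List.slice t none (some m)) = false
    rw [PySem.List.slice_to t hm0]
    exact hminj0 _ (by omega)
  have hjA' : ((PySem.List.pyRange 0 ((t.length : Int) + 1) 1).find?
      (fun j => okB seen (PySem.List.slice t none (some j)))).getD 0 = ((j0 : Nat) : Int) := by
    rw [findAsc hpA _ 0 rfl (by omega) (by omega) hminA, Option.getD_some]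
  -- first search on t.dropLast finds the same j0
  have hpB : (fun j => okB seen (PySem.List.slice t.dropLast none (some j))) ((j0 : Nat) : Int) = true := by
    show okB seen (PySem.List.slice t.dropLast none (some ((j0 : Nat) : Int))) = true
    rw [PySem.List.slice_to_natCast, htake j0 hj0le]
    exact hpj0
  have hminB : ∀ m : Int, 0 ≤ m → m < ((j0 : Nat) : Int) →
      (fun j => okB seen (PySem.List.slice t.dropLast none (some j))) m = false := by
    intro m hm0 hm
    show okB seen (PySem.List.slice t.dropLast none (some m)) = false
    rw [PySem.List.slice_to _ hm0, htake m.toNat (by omega)]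
    exact hminj0 _ (by omega)
  have hjB' : ((PySem.List.pyRange 0 ((t.dropLast.length : Int) + 1) 1).find?
      (fun j => okB seen (PySem.List.slice t.dropLast none (some j)))).getD 0 = ((j0 : Nat) : Int) := by
    rw [findAsc hpB _ 0 rfl (by omega) (by simp only [List.length_dropLast]; omega) hminB,
      Option.getD_some]
  -- the second searches coincide
  have hcong : (PySem.List.pyRange ((j0 : Nat) : Int) (-1) (-1)).find?
        (fun i => okB seen (PySem.List.slice t (some i) (some ((j0 : Nat) : Int)))) =
      (PySem.List.pyRange ((j0 : Nat) : Int) (-1) (-1)).find?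
        (fun i => okB seen (PySem.List.slice t.dropLast (some i) (some ((j0 : Nat) : Int)))) := by
    apply find?_congr_mem
    intro i hi
    have hi' := PySem.List.mem_pyRange_neg_one.mp hi
    have h0i : 0 ≤ i := by omega
    show okB seen (PySem.List.slice t (some i) (some ((j0 : Nat) : Int))) =
        okB seen (PySem.List.slice t.dropLast (some i) (some ((j0 : Nat) : Int)))
    rw [PySem.List.slice_toNat t h0i (by omega), PySem.List.slice_toNat t.dropLast h0i (by omega)]
    congr 1
    rw [List.dropLast_eq_take, List.drop_take, List.take_take]
    congr 1
    omega
  simp only [hjB, ht, hb, Bool.not_true, Bool.false_eq_true, if_false, hjA', hjB', hcong]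

-- dropping the first char when the last is not droppable but the first is does not change B
lemma hjB_tail {seen : List String} {t : List Char} (hb : okB seen t.dropLast = false)
    (hl : okB seen t.tail = true) : hjB t seen = hjB t.tail seen := by
  have h0 : t ≠ [] := by
    rintro rfl
    rw [List.dropLast_nil] at hb
    rw [List.tail_nil, hb] at hl
    exact Bool.noConfusion hl
  have hlen : 1 ≤ t.length := by cases t <;> simp_all
  have ht : okB seen t = true := okB_mono (List.tail_suffix t).isInfix hl
  have hP1 : okB seen (t.drop 1) = true := by rw [List.drop_one]; exact hl
  set K := Nat.findGreatest (fun i => okB seen (t.drop i) = true) t.length with hKdef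
  have hk1 : 1 ≤ K := Nat.le_findGreatest hlen hP1
  have hkle : K ≤ t.length := Nat.findGreatest_le _
  have hPK : okB seen (t.drop K) = true := by
    rw [hKdef]
    exact Nat.findGreatest_spec (P := fun i => okB seen (t.drop i) = true) hlen hP1
  have hgr : ∀ m : Nat, K < m → m ≤ t.length → okB seen (t.drop m) = false := by
    intro m hm hmle
    cases h : okB seen (t.drop m) with
    | false => rfl
    | true => exact absurd h (Nat.findGreatest_is_greatest hm hmle)
  -- second search on t stops at K
  have hpK : (fun i => okB seen (PySem.List.slice t (some i) (some (t.length : Int)))) ((K : Nat) : Int) = true := by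
    show okB seen (PySem.List.slice t (some ((K : Nat) : Int)) (some (t.length : Int))) = true
    rw [slice_drop t (by omega)]
    simpa using hPK
  have hmaxK : ∀ m : Int, ((K : Nat) : Int) < m → m ≤ ((t.length : Nat) : Int) →
      (fun i => okB seen (PySem.List.slice t (some i) (some (t.length : Int)))) m = false := by
    intro m hm0 hma
    show okB seen (PySem.List.slice t (some m) (some (t.length : Int))) = false
    rw [slice_drop t (by omega)]
    exact hgr m.toNat (by omega) (by omega)
  have hiA : ((PySem.List.pyRange ((t.length : Nat) : Int) (-1) (-1)).find?
      (fun i => okB seen (PySem.List.slice t (some i) (some (t.length : Int))))).getD 0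
      = ((K : Nat) : Int) := by
    rw [findDesc (by omega) hpK _ ((t.length : Nat) : Int) rfl (by omega) hmaxK, Option.getD_some]
  -- t.tail also has "full works, dropLast fails"
  have hbt : okB seen t.tail.dropLast = false := by
    cases h : okB seen t.tail.dropLast with
    | false => rfl
    | true =>
        exfalso
        rw [← List.tail_dropLast] at h
        rw [okB_mono (List.tail_suffix t.dropLast).isInfix h] at hb
        exact Bool.noConfusion hb
  -- second search on t.tail stops at K - 1
  have hpK' : (fun i => okB seen (PySem.List.slice t.tail (some i) (some (t.tail.length : Int)))) (((K - 1 : Nat) : Nat) : Int) = true := by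
    show okB seen (PySem.List.slice t.tail (some (((K - 1 : Nat) : Nat) : Int)) (some (t.tail.length : Int))) = true
    rw [slice_drop t.tail (by omega)]
    have heq : t.tail.drop (((K - 1 : Nat) : Int)).toNat = t.drop K := by
      rw [← List.drop_one, List.drop_drop]
      congr 1
      omega
    rw [heq]
    exact hPK
  have hmaxK' : ∀ m : Int, (((K - 1 : Nat) : Nat) : Int) < m → m ≤ ((t.tail.length : Nat) : Int) →
      (fun i => okB seen (PySem.List.slice t.tail (some i) (some (t.tail.length : Int)))) m = false := by
    intro m hm0 hma
    have hma' : m ≤ (t.length : Int) - 1 := by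
      rw [List.length_tail] at hma
      omega
    show okB seen (PySem.List.slice t.tail (some m) (some (t.tail.length : Int))) = false
    rw [slice_drop t.tail (by omega)]
    have heq : t.tail.drop m.toNat = t.drop (m.toNat + 1) := by
      rw [← List.drop_one, List.drop_drop]
      congr 1
      omega
    rw [heq]
    exact hgr (m.toNat + 1) (by omega) (by omega)
  have hiB : ((PySem.List.pyRange ((t.tail.length : Nat) : Int) (-1) (-1)).find?
      (fun i => okB seen (PySem.List.slice t.tail (some i) (some (t.tail.length : Int))))).getD 0
      = (((K - 1 : Nat) : Nat) : Int) := by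
    rw [findDesc (by omega) hpK' _ ((t.tail.length : Nat) : Int) rfl
      (by simp only [List.length_tail]; omega) hmaxK', Option.getD_some]
  simp only [hjB, ht, hl, Bool.not_true, Bool.false_eq_true, if_false]
  rw [jfind_full ht hb, jfind_full hl hbt, hiA, hiB]
  simp only [List.length_tail]
  omega

-- the all(map ...) of A's port is okB
lemma all_map_id (seen : List String) (u : List Char) :
    (seen.map (fun x => PySem.Chars.isIn x.toList u)).all id = okB seen u := by
  simp [okB, List.all_map]

lemma key (seen : List String) (hpre : ∃ x ∈ seen, x.toList ≠ []) :
    ∀ (n : Nat) (t : List Char), t.length = n → hjA (n + 1) t seen = hjB t seen := by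
  intro n
  induction n using Nat.strong_induction_on with
  | _ n IH =>
    intro t ht
    simp only [hjA, slice_pred, PySem.List.slice_from_one, all_map_id]
    by_cases hb : okB seen t.dropLast = true
    · have hbne : t.dropLast ≠ [] := okB_nonempty hpre hb
      have h0 : t ≠ [] := by rintro rfl; exact hbne rfl
      have hlen : 1 ≤ t.length := by cases t with | nil => exact absurd rfl h0 | cons a l => simp
      simp only [hb, Bool.not_true, Bool.false_and, Bool.false_eq_true, if_false, if_true]
      rw [hjB_dropLast hb]
      have hrec := IH (n - 1) (by omega) t.dropLast (by rw [List.length_dropLast, ht])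
      have hn : n - 1 + 1 = n := by omega
      rwa [hn] at hrec
    · have hb' : okB seen t.dropLast = false := by revert hb; cases okB seen t.dropLast <;> simp
      by_cases hl : okB seen t.tail = true
      · have hlne : t.tail ≠ [] := okB_nonempty hpre hl
        have h0 : t ≠ [] := by rintro rfl; exact hlne rfl
        have hlen : 1 ≤ t.length := by cases t with | nil => exact absurd rfl h0 | cons a l => simp
        simp only [hb', hl, Bool.not_true, Bool.not_false, Bool.and_false,
          Bool.false_eq_true, if_false, if_true]
        rw [hjB_tail hb' hl]
        have hrec := IH (n - 1) (by omega) t.tail (by rw [List.length_tail, ht])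
        have hn : n - 1 + 1 = n := by omega
        rwa [hn] at hrec
      · have hl' : okB seen t.tail = false := by revert hl; cases okB seen t.tail <;> simp
        simp only [hb', hl', Bool.not_false, Bool.and_self, if_true]
        by_cases hto : okB seen t = true
        · exact (hjB_base hto hb' hl').symm
        · have hto' : okB seen t = false := by revert hto; cases okB seen t <;> simp
          simp [hjB, hto']

-- ===== VERDICT (by name: the statement is the Claim_ definition above) =====
theorem hjalparfall_spec : Claim_equal_hjalparfall := by
  intro s seen _ hpre
  unfold Spec_hjalparfall hjalparfall hjalparfall_alt
  have hpre' : ∃ x ∈ seen, x.toList ≠ [] := by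
    obtain ⟨x, hx, hne⟩ := hpre
    exact ⟨x, hx, by simpa using hne⟩
  exact key seen hpre' s.toList.length s.toList rfl
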